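-- pv_equiv track=rewrite | github.com/aaroshdas/linear_regression_crispr_cas12a | helper_scripts/feature_engineering.py | homopolymer_runs
-- ===== SOURCE A (Python) =====
-- def homopolymer_runs(seq: str, min_run: int = 3) -> int:
--     """Count of homopolymer runs of length >= min_run."""
--     seq = seq.upper()
--     count = 0
--     i = 0
--     while i < len(seq):
--         run = 1
--         while i + run < len(seq) and seq[i + run] == seq[i]:
--             run += 1
--         if run >= min_run:
--             count += 1
--         i += run
--     return count
-- ===== SOURCE B (Python) =====
-- def homopolymer_runs(seq: str, min_run: int = 3) -> int:
--     """Count of homopolymer runs of length >= min_run."""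
--     s = seq.upper()
--     n = len(s)
--     # indices where a maximal run starts, plus the end sentinel n
--     bounds = [i for i in range(n + 1) if i == 0 or i == n or s[i] != s[i - 1]]
--     return sum(1 for j, k in zip(bounds, bounds[1:]) if k - j >= min_run)
-- ===== Notes on version B (the rewrite author's own statement) =====
-- stated objective: alternative
-- what changed: Replaced the two-pointer index-advancing scan (inner while extending each run) by computing the list of run-boundary indices with a comprehension and counting adjacent boundary differences >= min_run.
import Mathlib
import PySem

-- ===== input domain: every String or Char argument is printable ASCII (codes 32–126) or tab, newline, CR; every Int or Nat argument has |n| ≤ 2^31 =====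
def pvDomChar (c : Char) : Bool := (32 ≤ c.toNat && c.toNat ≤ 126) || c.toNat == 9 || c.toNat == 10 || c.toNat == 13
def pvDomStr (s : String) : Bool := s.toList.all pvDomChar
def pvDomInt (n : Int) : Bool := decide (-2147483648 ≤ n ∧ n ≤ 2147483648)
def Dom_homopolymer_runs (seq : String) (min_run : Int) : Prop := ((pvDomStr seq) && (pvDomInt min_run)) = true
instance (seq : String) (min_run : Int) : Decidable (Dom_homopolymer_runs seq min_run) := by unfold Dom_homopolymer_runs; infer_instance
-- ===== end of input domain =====

-- B replaces A's two-pointer index-advancing scan by a boundary-index list plus a count of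
-- adjacent boundary differences >= min_run; objective: alternative decomposition (same cost).

-- ===== PORT A =====
-- inner while loop of A: number of following characters equal to seq[i]
def pvRunLen (c : Char) : List Char → Nat
  | [] => 0
  | d :: ds => if d == c then 1 + pvRunLen c ds else 0

-- outer while loop of A over the remaining suffix (i += run ports as dropping the run)
def pvLoopA (min_run : Int) (count : Int) : List Char → Int
  | [] => count
  | c :: cs =>
    let run : Nat := 1 + pvRunLen c cs
    let count' : Int := if (run : Int) ≥ min_run then count + 1 else count
    pvLoopA min_run count' (List.drop (pvRunLen c cs) cs)
termination_by l => l.length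
decreasing_by simp [List.length_drop]

def homopolymer_runs (seq : String) (min_run : Int) : Int :=
  pvLoopA min_run 0 (PySem.Str.upper seq).toList

-- ===== PORT B =====
-- Source B's sum(1 for j, k in zip(bounds, bounds[1:]) if k - j >= min_run)
def pvCountDiffs (min_run : Int) (bounds : List Nat) : Int :=
  (bounds.zip (bounds.drop 1)).foldl
    (fun acc jk => if ((jk.2 : Int) - (jk.1 : Int)) ≥ min_run then acc + 1 else acc) 0

def homopolymer_runs_alt (seq : String) (min_run : Int) : Int :=
  let s := (PySem.Str.upper seq).toList
  let n := s.length
  -- range(n+1) over nonnegative ints ports as List.range (n+1); by the short-circuit the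
  -- indexings s[i], s[i-1] are in range there, so getD is exact
  let bounds := (List.range (n + 1)).filter
    (fun i => i == 0 || i == n || !(s.getD i ' ' == s.getD (i - 1) ' '))
  pvCountDiffs min_run bounds

-- ===== PRECONDITION & SPEC =====
def Spec_homopolymer_runs (seq : String) (min_run : Int) (out : Int) : Prop := out = homopolymer_runs_alt seq min_run
instance (seq : String) (min_run : Int) (out : Int) : Decidable (Spec_homopolymer_runs seq min_run out) := by unfold Spec_homopolymer_runs; infer_instance

-- ===== CLAIM (what is proved, stated in full; the proofs are below) =====
def Claim_equal_homopolymer_runs : Prop := ∀ (seq : String) (min_run : Int), Dom_homopolymer_runs seq min_run → Spec_homopolymer_runs seq min_run (homopolymer_runs seq min_run)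

-- ===== LEMMAS AND PROOFS =====

-- run-length decomposition of a list
def pvRunLens : List Char → List Nat
  | [] => []
  | c :: cs => (1 + pvRunLen c cs) :: pvRunLens (List.drop (pvRunLen c cs) cs)
termination_by l => l.length
decreasing_by simp [List.length_drop]

theorem pvRunLens_nil : pvRunLens [] = [] := by rw [pvRunLens]

theorem pvRunLens_cons (c : Char) (cs : List Char) :
    pvRunLens (c :: cs) = (1 + pvRunLen c cs) :: pvRunLens (List.drop (pvRunLen c cs) cs) := by
  rw [pvRunLens]

-- cumulative sums: boundary indices of the runs
def pvCsum (a : Nat) : List Nat → List Nat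
  | [] => [a]
  | r :: rs => a :: pvCsum (a + r) rs

theorem pvRunLen_le (c : Char) (ds : List Char) : pvRunLen c ds ≤ ds.length := by
  induction ds with
  | nil => simp [pvRunLen]
  | cons d ds ih =>
    simp only [pvRunLen, List.length_cons]
    split
    · omega
    · omega

theorem pvRunLen_getD (c : Char) (ds : List Char) (j : Nat) (h : j < pvRunLen c ds) :
    ds.getD j ' ' = c := by
  induction ds generalizing j with
  | nil => simp [pvRunLen] at h
  | cons d ds ih =>
    simp only [pvRunLen] at h
    split at h
    · rename_i hd
      cases j with
      | zero => simpa using (beq_iff_eq.mp hd)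
      | succ j => simpa using ih j (by omega)
    · omega

theorem pvRunLen_stop (c : Char) (ds : List Char) (h : pvRunLen c ds < ds.length) :
    ds.getD (pvRunLen c ds) ' ' ≠ c := by
  induction ds with
  | nil => simp at h
  | cons d ds ih =>
    by_cases hd : (d == c) = true
    · rw [pvRunLen, if_pos hd] at h ⊢
      simp only [List.length_cons] at h
      rw [show (1 : Nat) + pvRunLen c ds = pvRunLen c ds + 1 by omega]
      simp only [List.getD_cons_succ]
      exact ih (by omega)
    · rw [pvRunLen, if_neg hd]
      simp only [List.getD_cons_zero]
      exact fun hc => hd (beq_iff_eq.mpr hc)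

theorem getD_drop' (s : List Char) (a j : Nat) :
    (s.drop a).getD j ' ' = s.getD (a + j) ' ' := by
  rcases Nat.lt_or_ge (a + j) s.length with h | h
  · rw [List.getD_eq_getElem _ _ (by simp; omega), List.getD_eq_getElem _ _ h,
      List.getElem_drop]
  · rw [List.getD_eq_default _ _ (by simp; omega), List.getD_eq_default _ _ h]

-- A's loop counts the run lengths ≥ min_run
theorem pvLoopA_eq (m : Int) :
    ∀ (k : Nat) (l : List Char), l.length ≤ k → ∀ (count : Int),
    pvLoopA m count l
      = count + ((pvRunLens l).countP (fun r : Nat => decide (m ≤ (r : Int))) : Int) := by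
  intro k
  induction k with
  | zero =>
    intro l hl count
    have : l = [] := List.length_eq_zero_iff.mp (by omega)
    subst this
    rw [pvLoopA, pvRunLens_nil]
    simp
  | succ k ih =>
    intro l hl count
    cases l with
    | nil => rw [pvLoopA, pvRunLens_nil]; simp
    | cons c cs =>
      rw [pvLoopA, pvRunLens_cons]
      have hlen : (List.drop (pvRunLen c cs) cs).length ≤ k := by
        simp only [List.length_cons] at hl
        simp [List.length_drop]; omega
      rw [ih _ hlen]
      simp only [List.countP_cons]
      split
      · rename_i h
        have hdec : decide (m ≤ ((1 + pvRunLen c cs : Nat) : Int)) = true := by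
          simp only [decide_eq_true_eq]; push_cast at h ⊢; omega
        rw [hdec, if_pos rfl]
        push_cast
        ring
      · rename_i h
        have hdec : decide (m ≤ ((1 + pvRunLen c cs : Nat) : Int)) = false := by
          simp only [decide_eq_false_iff_not]; push_cast at h ⊢; omega
        rw [hdec, if_neg Bool.false_ne_true]
        push_cast
        ring

-- the filtered index range is exactly the cumulative-sum boundary list of the runs
theorem bounds_eq (s : List Char) :
    ∀ (k a : Nat), s.length - a ≤ k → a ≤ s.length →
    (a = 0 ∨ a = s.length ∨ s.getD a ' ' ≠ s.getD (a - 1) ' ') →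
    (List.range' a (s.length + 1 - a)).filter
        (fun i => i == 0 || i == s.length || !(s.getD i ' ' == s.getD (i - 1) ' '))
      = pvCsum a (pvRunLens (s.drop a)) := by
  have hbase : (List.range' s.length (s.length + 1 - s.length)).filter
        (fun i => i == 0 || i == s.length || !(s.getD i ' ' == s.getD (i - 1) ' '))
      = pvCsum s.length (pvRunLens (s.drop s.length)) := by
    rw [List.drop_length, pvRunLens_nil]
    have h1 : s.length + 1 - s.length = 1 := by omega
    rw [h1]
    simp [List.range', pvCsum]
  intro k
  induction k with
  | zero =>
    intro a hk ha _
    have : a = s.length := by omega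
    subst this
    exact hbase
  | succ k ih =>
    intro a hk ha hb
    rcases Nat.eq_or_lt_of_le ha with haeq | halt
    · subst haeq; exact hbase
    · -- a < s.length
      have hdrop : s.drop a = s[a] :: s.drop (a + 1) := List.drop_eq_getElem_cons halt
      have hgc : s.getD a ' ' = s[a] := List.getD_eq_getElem s ' ' halt
      -- abbreviate the inner run length (opaque variable for omega)
      obtain ⟨t, ht⟩ : ∃ t, pvRunLen s[a] (List.drop (a + 1) s) = t := ⟨_, rfl⟩
      have htle : t ≤ s.length - (a + 1) := by
        have h1 := pvRunLen_le s[a] (s.drop (a + 1))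
        rw [ht] at h1
        simpa [List.length_drop] using h1
      have hrun : pvRunLens (s.drop a) = (1 + t) :: pvRunLens (s.drop (a + (1 + t))) := by
        rw [hdrop, pvRunLens_cons, ht, List.drop_drop,
          show a + 1 + t = a + (1 + t) by omega]
      have harn : a + (1 + t) ≤ s.length := by omega
      have hin : ∀ j, 1 ≤ j → j < 1 + t → s.getD (a + j) ' ' = s[a] := by
        intro j h1 h2
        have h3 : (s.drop (a + 1)).getD (j - 1) ' ' = s[a] :=
          pvRunLen_getD _ _ _ (by rw [ht]; omega)
        rw [getD_drop'] at h3
        rwa [show a + 1 + (j - 1) = a + j by omega] at h3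
      have hsplit : List.range' a (s.length + 1 - a)
          = List.range' a (1 + t) ++ List.range' (a + (1 + t)) (s.length + 1 - (a + (1 + t))) := by
        have h1 := List.range'_append (s := a) (m := 1 + t)
          (n := s.length + 1 - (a + (1 + t))) (step := 1)
        simp only [Nat.one_mul] at h1
        rw [show s.length + 1 - a = (1 + t) + (s.length + 1 - (a + (1 + t))) by omega]
        exact h1.symm
      rw [hsplit, List.filter_append, hrun]
      have hfilter1 : (List.range' a (1 + t)).filter
          (fun i => i == 0 || i == s.length || !(s.getD i ' ' == s.getD (i - 1) ' ')) = [a] := by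
        have hcons : List.range' a (1 + t) = a :: List.range' (a + 1) t := by
          rw [show 1 + t = t + 1 by omega, List.range'_succ]
        rw [hcons]
        rw [List.filter_cons_of_pos (by
          rcases hb with h | h | h
          · simp [h]
          · omega
          · simp only [Bool.or_eq_true, beq_iff_eq, Bool.not_eq_true', beq_eq_false_iff_ne]
            tauto)]
        rw [List.filter_eq_nil_iff.mpr ?_]
        intro i hi
        simp only [List.mem_range'] at hi
        obtain ⟨j, hj, hij⟩ := hi
        have hi1 : a + 1 ≤ i := by omega
        have hir : i < a + (1 + t) := by omega
        have hieq : s.getD i ' ' = s[a] := by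
          have h2 := hin (i - a) (by omega) (by omega)
          rwa [show a + (i - a) = i by omega] at h2
        have hprev : s.getD (i - 1) ' ' = s[a] := by
          rcases Nat.eq_or_lt_of_le hi1 with h1 | h1
          · rw [show i - 1 = a by omega]; exact hgc
          · have h2 := hin (i - 1 - a) (by omega) (by omega)
            rwa [show a + (i - 1 - a) = i - 1 by omega] at h2
        have h0 : i ≠ 0 := by omega
        have hn : i ≠ s.length := by omega
        have heq2 : s.getD i ' ' = s.getD (i - 1) ' ' := by rw [hieq, hprev]
        simp only [List.getD_eq_getElem?_getD] at heq2
        simp [h0, hn, heq2]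
      rw [hfilter1]
      have hnext : a + (1 + t) = 0 ∨ a + (1 + t) = s.length ∨
          s.getD (a + (1 + t)) ' ' ≠ s.getD (a + (1 + t) - 1) ' ' := by
        rcases Nat.eq_or_lt_of_le harn with h | h
        · exact Or.inr (Or.inl h)
        · refine Or.inr (Or.inr ?_)
          have hstop : s.getD (a + (1 + t)) ' ' ≠ s[a] := by
            have h1 : pvRunLen s[a] (List.drop (a + 1) s) < (List.drop (a + 1) s).length := by
              rw [ht]; simp only [List.length_drop]; omega
            have h2 := pvRunLen_stop s[a] (s.drop (a + 1)) h1
            rw [ht, getD_drop'] at h2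
            rwa [show a + 1 + t = a + (1 + t) by omega] at h2
          have hlast : s.getD (a + (1 + t) - 1) ' ' = s[a] := by
            rcases Nat.eq_zero_or_pos t with h1 | h1
            · rw [show a + (1 + t) - 1 = a by omega]; exact hgc
            · have h2 := hin (t) (by omega) (by omega)
              rwa [show a + t = a + (1 + t) - 1 by omega] at h2
          rw [hlast]; exact hstop
      have ihr := ih (a + (1 + t)) (by omega) harn hnext
      rw [ihr, pvCsum]
      rfl

-- counting adjacent differences over a cumulative-sum list counts the run lengths
theorem pvCountDiffs_csum (m : Int) :
    ∀ (rs : List Nat) (a : Nat),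
      pvCountDiffs m (pvCsum a rs)
        = ((rs.countP (fun r : Nat => decide (m ≤ (r : Int)))) : Int) := by
  have hfold : ∀ (l : List (Nat × Nat)) (acc : Int),
      l.foldl (fun acc jk => if ((jk.2 : Int) - (jk.1 : Int)) ≥ m then acc + 1 else acc) acc
        = acc + l.foldl (fun acc jk => if ((jk.2 : Int) - (jk.1 : Int)) ≥ m then acc + 1 else acc) 0 := by
    intro l
    induction l with
    | nil => simp
    | cons p l ih =>
      intro acc
      simp only [List.foldl_cons]
      rw [ih (if ((p.2 : Int) - (p.1 : Int)) ≥ m then acc + 1 else acc),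
        ih (if ((p.2 : Int) - (p.1 : Int)) ≥ m then (0 : Int) + 1 else 0)]
      split <;> ring
  intro rs
  induction rs with
  | nil => intro a; simp [pvCsum, pvCountDiffs]
  | cons r rs ih =>
    intro a
    obtain ⟨u, hu, hu'⟩ : ∃ u, pvCsum (a + r) rs = (a + r) :: u ∧ (pvCsum (a + r) rs).drop 1 = u := by
      cases rs <;> exact ⟨_, rfl, rfl⟩
    have ihr := ih (a + r)
    simp only [pvCountDiffs, hu, List.drop_succ_cons, List.drop_zero] at ihr
    simp only [pvCountDiffs, pvCsum, hu, List.drop_succ_cons, List.drop_zero,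
      List.zip_cons_cons, List.foldl_cons]
    rw [hfold, ihr, List.countP_cons]
    have hd : ((a + r : Nat) : Int) - ((a : Nat) : Int) = (r : Int) := by push_cast; ring
    rw [hd]
    split
    · rename_i h
      have hdec : decide (m ≤ ((r : Nat) : Int)) = true := by
        simp only [decide_eq_true_eq]; omega
      rw [hdec, if_pos rfl]
      push_cast
      ring
    · rename_i h
      have hdec : decide (m ≤ ((r : Nat) : Int)) = false := by
        simp only [decide_eq_false_iff_not]; omega
      rw [hdec, if_neg Bool.false_ne_true]
      push_cast
      ring

-- ===== VERDICT (by name: the statement is the Claim_ definition above) =====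
theorem homopolymer_runs_spec : Claim_equal_homopolymer_runs := by
  intro seq min_run _
  unfold Spec_homopolymer_runs homopolymer_runs
  simp only [homopolymer_runs_alt]
  set s := (PySem.Str.upper seq).toList with hs
  rw [pvLoopA_eq min_run s.length s (le_refl _)]
  have hb := bounds_eq s s.length 0 (by omega) (by omega) (Or.inl rfl)
  simp only [Nat.sub_zero, List.drop_zero] at hb
  rw [← List.range_eq_range'] at hb
  rw [hb, pvCountDiffs_csum]
  simp
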